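-- pv_equiv track=rewrite | github.com/denher98/vod_clipper | ffmpeg_editor.py | _match_keyword_at
-- ===== SOURCE A (Python) =====
-- def _match_keyword_at(word_entries: list[dict], start_idx: int, keyword_tokens: list[str]) -> bool:
--     if not keyword_tokens:
--         return False
--
--     flat_tokens = []
--     for entry in word_entries[start_idx:]:
--         flat_tokens.extend(entry["tokens"])
--         if len(flat_tokens) >= len(keyword_tokens):
--             return flat_tokens[:len(keyword_tokens)] == keyword_tokens
--     return False
-- ===== SOURCE B (Python) =====
-- def _match_keyword_at(word_entries: list[dict], start_idx: int, keyword_tokens: list[str]) -> bool: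
--     if not keyword_tokens:
--         return False
--     n = len(keyword_tokens)
--     ki = 0
--     for entry in word_entries[start_idx:]:
--         for tok in entry["tokens"]:
--             if ki == n:
--                 return True
--             if tok != keyword_tokens[ki]:
--                 return False
--             ki += 1
--         if ki == n:
--             return True
--     return False
-- ===== Notes on version B (the rewrite author's own statement) =====
-- stated objective: simpler
-- what changed: B drops the growing flat_tokens accumulator and its slice-and-compare; it threads a match cursor into keyword_tokens, comparing token by token with fail-fast on the first mismatch and returning True the moment the cursor reaches the end.
-- outside the precondition, e.g. on _match_keyword_at([{'tokens': ['a']}, {}], 0, ['a']): A returns True, B returns True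
import Mathlib
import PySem

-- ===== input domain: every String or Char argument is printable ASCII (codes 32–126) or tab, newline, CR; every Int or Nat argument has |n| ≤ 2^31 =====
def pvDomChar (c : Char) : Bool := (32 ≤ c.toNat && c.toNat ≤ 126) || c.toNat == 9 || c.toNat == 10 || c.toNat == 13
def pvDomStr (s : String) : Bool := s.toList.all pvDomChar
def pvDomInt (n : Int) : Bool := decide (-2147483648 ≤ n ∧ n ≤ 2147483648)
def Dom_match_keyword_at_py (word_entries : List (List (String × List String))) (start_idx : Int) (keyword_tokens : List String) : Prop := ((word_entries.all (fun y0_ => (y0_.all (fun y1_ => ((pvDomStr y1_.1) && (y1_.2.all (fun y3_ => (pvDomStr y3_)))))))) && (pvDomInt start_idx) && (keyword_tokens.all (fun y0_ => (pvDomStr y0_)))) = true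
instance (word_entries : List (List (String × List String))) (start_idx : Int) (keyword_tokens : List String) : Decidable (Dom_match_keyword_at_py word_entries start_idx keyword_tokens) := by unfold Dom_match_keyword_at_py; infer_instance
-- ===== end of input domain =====

-- B replaces A's growing flat_tokens accumulator with a match cursor into keyword_tokens,
-- failing fast on the first mismatching token (simpler; return value proved equal on Pre_;
-- B may return False where A raises KeyError on a malformed later entry — excluded by Pre_).

-- entry["tokens"] (Pre_ guarantees the key is present on every entry the loop can touch)
def pvTokens (e : List (String × List String)) : List String :=
  ((PySem.Dict.mk e).get? "tokens").getD []

-- ===== PORT A =====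
-- A's loop: extend flat_tokens by the entry's tokens; once long enough, compare the prefix.
def pvLoopA (kts : List String) : List (List (String × List String)) → List String → Bool
  | [], _ => false
  | e :: rest, flat =>
    let flat2 := flat ++ pvTokens e
    if kts.length ≤ flat2.length then decide (flat2.take kts.length = kts)
    else pvLoopA kts rest flat2

def match_keyword_at_py (word_entries : List (List (String × List String))) (start_idx : Int) (keyword_tokens : List String) : Bool :=
  if keyword_tokens = [] then false
  else pvLoopA keyword_tokens (PySem.List.slice word_entries (some start_idx) none) []

-- ===== PORT B =====
-- consume the entry's tokens against the remaining keyword tokens (B's inner for-loop):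
-- some rem' = matched so far, rem' still to match; none = a token mismatched → False.
def pvEat : List String → List String → Option (List String)
  | _, [] => some []
  | [], rem => some rem
  | t :: ts, r :: rs => if t = r then pvEat ts rs else none

def pvLoopB : List (List (String × List String)) → List String → Bool
  | [], _ => false
  | e :: rest, rem =>
    match pvEat (pvTokens e) rem with
    | none => false
    | some rem' => if rem' = [] then true else pvLoopB rest rem'

def match_keyword_at_py_alt (word_entries : List (List (String × List String))) (start_idx : Int) (keyword_tokens : List String) : Bool :=
  if keyword_tokens = [] then false
  else pvLoopB (PySem.List.slice word_entries (some start_idx) none) keyword_tokens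

-- ===== PRECONDITION & SPEC =====
-- Pre_ asks every entry in word_entries[start_idx:] to carry the "tokens" key (unless
-- keyword_tokens is empty): A raises KeyError on a keyless entry it reaches; Pre_ is slightly
-- narrower than that (it also excludes inputs where A stops before a keyless later entry and
-- returns — see cites), because 'how far the scan gets' is not a closed-form input condition.
def Pre_match_keyword_at_py (word_entries : List (List (String × List String))) (start_idx : Int) (keyword_tokens : List String) : Prop :=
  keyword_tokens = [] ∨
    ∀ e ∈ PySem.List.slice word_entries (some start_idx) none, ((PySem.Dict.mk e).get? "tokens").isSome

instance (word_entries : List (List (String × List String))) (start_idx : Int) (keyword_tokens : List String) : Decidable (Pre_match_keyword_at_py word_entries start_idx keyword_tokens) := by unfold Pre_match_keyword_at_py; infer_instance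

def pvWitness_match_keyword_at_py : (List (List (String × List String))) × Int × List String :=
  ([[("tokens", ["hi", "there"])], [("tokens", ["friend"])]], 0, ["hi", "there"])

def Spec_match_keyword_at_py (word_entries : List (List (String × List String))) (start_idx : Int) (keyword_tokens : List String) (out : Bool) : Prop := out = match_keyword_at_py_alt word_entries start_idx keyword_tokens
instance (word_entries : List (List (String × List String))) (start_idx : Int) (keyword_tokens : List String) (out : Bool) : Decidable (Spec_match_keyword_at_py word_entries start_idx keyword_tokens out) := by unfold Spec_match_keyword_at_py; infer_instance

-- ===== CLAIM (what is proved, stated in full; the proofs are below) =====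
def Claim_equal_match_keyword_at_py : Prop := ∀ (word_entries : List (List (String × List String))) (start_idx : Int) (keyword_tokens : List String), Dom_match_keyword_at_py word_entries start_idx keyword_tokens → Pre_match_keyword_at_py word_entries start_idx keyword_tokens → Spec_match_keyword_at_py word_entries start_idx keyword_tokens (match_keyword_at_py word_entries start_idx keyword_tokens)

-- ===== LEMMAS AND PROOFS =====

-- pvEat in terms of prefix relations
theorem pvEat_eq (ts rem : List String) :
    pvEat ts rem =
      if rem <+: ts then some []
      else if ts <+: rem then some (rem.drop ts.length)
      else none := by
  induction ts generalizing rem with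
  | nil =>
    cases rem with
    | nil => simp [pvEat]
    | cons r rs => simp [pvEat]
  | cons t ts ih =>
    cases rem with
    | nil => simp [pvEat]
    | cons r rs =>
      by_cases h : t = r
      · subst h
        simp [pvEat, ih rs, List.cons_prefix_cons]
      · simp [pvEat, h, List.cons_prefix_cons, Ne.symm h]

-- if flat can no longer be completed to kts, A's loop returns false
theorem pvLoopA_false (kts : List String) (entries : List (List (String × List String)))
    (flat : List String) (hlen : flat.length < kts.length) (hpre : ¬ flat <+: kts) :
    pvLoopA kts entries flat = false := by
  induction entries generalizing flat with
  | nil => simp [pvLoopA]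
  | cons e rest ih =>
    simp only [pvLoopA]
    split
    · next hge =>
      simp only [decide_eq_false_iff_not]
      intro heq
      apply hpre
      have : flat <+: flat ++ pvTokens e := List.prefix_append _ _
      have h2 : (flat ++ pvTokens e).take kts.length <+: flat ++ pvTokens e := List.take_prefix _ _
      rw [heq] at h2
      -- flat <+: (flat ++ ts).take kts.length since flat.length ≤ kts.length
      have h3 : flat <+: (flat ++ pvTokens e).take kts.length := by
        rw [List.prefix_iff_eq_take] at this ⊢
        rw [List.take_take, min_eq_left (by omega), ← this]
      rwa [heq] at h3
    · next hlt =>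
      exact ih _ (by omega) (fun h => hpre ((List.prefix_append _ _).trans h))

-- main invariant: flat is a proper prefix of kts ⇒ A's loop = B's loop on the remainder
theorem pvLoopA_eq_pvLoopB (kts : List String) (entries : List (List (String × List String)))
    (flat : List String) (hpre : flat <+: kts) (hlen : flat.length < kts.length) :
    pvLoopA kts entries flat = pvLoopB entries (kts.drop flat.length) := by
  induction entries generalizing flat with
  | nil => simp [pvLoopA, pvLoopB]
  | cons e rest ih =>
    obtain ⟨rem, hrem⟩ := hpre
    have hremlen : rem.length = kts.length - flat.length := by
      have := congrArg List.length hrem; simp at this; omega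
    have hdrop : kts.drop flat.length = rem := by
      rw [← hrem]; simp
    simp only [pvLoopA, pvLoopB, hdrop, pvEat_eq]
    by_cases hc1 : rem <+: pvTokens e
    · -- entry completes the keyword: both sides True
      have hge : kts.length ≤ (flat ++ pvTokens e).length := by
        have := hc1.length_le; simp; omega
      simp only [if_pos hc1, hge, if_true]
      simp only [decide_eq_true_eq]
      obtain ⟨ext, hext⟩ := hc1
      rw [← hext, ← hrem]
      rw [List.length_append, List.take_append, List.take_of_length_le (by omega),
        Nat.add_sub_cancel_left, List.take_append, List.take_length, Nat.sub_self,
        List.take_zero, List.append_nil]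
    · simp only [if_neg hc1]
      by_cases hc2 : pvTokens e <+: rem
      · -- entry is a proper prefix of the remainder: both sides recurse
        have hne : rem.drop (pvTokens e).length ≠ [] := by
          intro h
          apply hc1
          have hle : rem.length ≤ (pvTokens e).length := by
            have := congrArg List.length h; simp at this; omega
          have heq := hc2.eq_of_length (le_antisymm hc2.length_le hle)
          rw [heq]
        have hlt2 : (flat ++ pvTokens e).length < kts.length := by
          have h1 : (pvTokens e).length ≤ rem.length := hc2.length_le
          have h2 : (pvTokens e).length ≠ rem.length := by
            intro h
            exact hne (by rw [h]; simp)
          simp; omega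
        have hpre2 : flat ++ pvTokens e <+: kts := by
          obtain ⟨ext2, hext2⟩ := hc2
          exact ⟨ext2, by rw [List.append_assoc, hext2, hrem]⟩
        simp only [if_pos hc2, if_neg hne, if_neg (by omega : ¬ kts.length ≤ (flat ++ pvTokens e).length)]
        rw [ih _ hpre2 hlt2]
        congr 1
        rw [← hdrop, List.drop_drop]
        congr 1
        simp
      · -- mismatch: B says False, A can never complete
        simp only [if_neg hc2]
        by_cases hge : kts.length ≤ (flat ++ pvTokens e).length
        · simp only [if_pos hge, decide_eq_false_iff_not]
          intro heq
          apply hc1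
          -- from (flat ++ ts).take kts.length = kts = flat ++ rem deduce ts.take rem.length = rem
          have hts : rem.length ≤ (pvTokens e).length := by simp at hge; omega
          rw [← hrem, List.length_append, List.take_append,
            List.take_of_length_le (by omega), Nat.add_sub_cancel_left] at heq
          have h2 := List.append_cancel_left heq
          refine ⟨(pvTokens e).drop rem.length, ?_⟩
          nth_rewrite 1 [← h2]
          exact List.take_append_drop _ _
        · simp only [if_neg hge]
          apply pvLoopA_false
          · simp at hge ⊢; omega
          · intro hp
            apply hc2
            rw [← hrem] at hp
            exact (List.prefix_append_right_inj flat).mp hp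

-- ===== VERDICT (by name: the statement is the Claim_ definition above) =====
theorem match_keyword_at_py_spec : Claim_equal_match_keyword_at_py := by
  intro we si kts _ hpre
  unfold Spec_match_keyword_at_py match_keyword_at_py match_keyword_at_py_alt
  by_cases hk : kts = []
  · simp [hk]
  · simp only [if_neg hk]
    have := pvLoopA_eq_pvLoopB kts (PySem.List.slice we (some si) none) []
      (List.nil_prefix) (by cases kts <;> simp_all)
    simpa using this
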